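-- pv_equiv track=rewrite | github.com/sandipan1nayek/sentiment_analyzer | comprehensive_media.py | _is_primary_subject
-- ===== SOURCE A (Python) =====
-- def _is_primary_subject(entity_lower, text):
--     """
--     Check if entity is the PRIMARY subject, not just mentioned
--     """
--     # Entity must appear in first 50 characters (title focus)
--     if entity_lower in text[:50]:
--         return True
--
--     # Or be the clear subject with action verbs
--     subject_patterns = [
--         f"{entity_lower} announces", f"{entity_lower} says", f"{entity_lower} declares",
--         f"{entity_lower} launches", f"{entity_lower} visits", f"{entity_lower} meets",
--         f"{entity_lower} criticizes", f"{entity_lower} supports", f"{entity_lower} opposes",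
--         f"{entity_lower}'s new", f"{entity_lower}'s latest", f"{entity_lower}'s recent"
--     ]
--
--     return any(pattern in text for pattern in subject_patterns)
-- ===== SOURCE B (Python) =====
-- _SUFFIXES = (" announces", " says", " declares", " launches", " visits", " meets",
--              " criticizes", " supports", " opposes", "'s new", "'s latest", "'s recent")
--
--
-- def _is_primary_subject(entity_lower, text):
--     # One left-to-right scan over the occurrences of the entity itself:
--     # an occurrence ending within the first 50 characters, or one followed
--     # immediately by an action-verb / possessive suffix, makes it primary.
--     n = len(entity_lower)
--     for i in range(len(text) - n + 1):
--         if text.startswith(entity_lower, i):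
--             if i + n <= 50:
--                 return True
--             if text.startswith(_SUFFIXES, i + n):
--                 return True
--     return False
-- ===== Notes on version B (the rewrite author's own statement) =====
-- stated objective: alternative
-- what changed: Instead of building 12 entity+suffix pattern strings and running a separate substring search for each (plus one search in text[:50]), B makes a single left-to-right scan over the occurrences of the entity itself and classifies each occurrence by its position (ends within the first 50 characters) or by the suffix that immediately follows it.
import Mathlib
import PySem

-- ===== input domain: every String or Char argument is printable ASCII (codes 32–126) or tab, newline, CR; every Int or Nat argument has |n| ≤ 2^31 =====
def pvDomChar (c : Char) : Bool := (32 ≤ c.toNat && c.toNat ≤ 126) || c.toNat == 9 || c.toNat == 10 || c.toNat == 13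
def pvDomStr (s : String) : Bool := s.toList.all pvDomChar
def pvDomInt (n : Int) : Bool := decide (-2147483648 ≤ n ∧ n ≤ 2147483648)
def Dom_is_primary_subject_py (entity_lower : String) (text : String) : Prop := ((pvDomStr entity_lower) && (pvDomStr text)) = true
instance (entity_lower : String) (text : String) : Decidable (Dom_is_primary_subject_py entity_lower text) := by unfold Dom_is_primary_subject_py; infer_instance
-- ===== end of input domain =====

-- B replaces A's 12 pattern-building substring searches by a single scan over the
-- occurrences of the entity, classifying each occurrence by position or following suffix.

-- ===== PORT A =====
-- the 12 f-string patterns, in A's order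
def pvPatterns (e : List Char) : List (List Char) :=
  [e ++ (" announces").toList, e ++ (" says").toList, e ++ (" declares").toList,
   e ++ (" launches").toList, e ++ (" visits").toList, e ++ (" meets").toList,
   e ++ (" criticizes").toList, e ++ (" supports").toList, e ++ (" opposes").toList,
   e ++ ("'s new").toList, e ++ ("'s latest").toList, e ++ ("'s recent").toList]

def is_primary_subject_py (entity_lower : String) (text : String) : Bool :=
  let e := entity_lower.toList
  let cs := text.toList
  if PySem.Chars.isIn e (PySem.List.slice cs none (some 50)) then true
  else (pvPatterns e).any (fun p => PySem.Chars.isIn p cs)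

-- ===== PORT B =====
def pvSuffixes : List (List Char) :=
  [(" announces").toList, (" says").toList, (" declares").toList,
   (" launches").toList, (" visits").toList, (" meets").toList,
   (" criticizes").toList, (" supports").toList, (" opposes").toList,
   ("'s new").toList, ("'s latest").toList, ("'s recent").toList]

-- Source B's `text.startswith(entity_lower, i)` (0 ≤ i ≤ len(text)) is exactly
-- a startswith check on the tail from i; likewise for the suffix tuple at i+n.
def is_primary_subject_py_alt (entity_lower : String) (text : String) : Bool :=
  let e := entity_lower.toList
  let cs := text.toList
  let n := e.length
  (PySem.List.pyRange 0 ((cs.length : Int) - n + 1) 1).any (fun i =>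
    PySem.Chars.startswith (cs.drop i.toNat) e &&
      (decide (i.toNat + n ≤ 50) ||
       pvSuffixes.any (fun suf => PySem.Chars.startswith (cs.drop (i.toNat + n)) suf)))

-- ===== PRECONDITION & SPEC =====
def Spec_is_primary_subject_py (entity_lower : String) (text : String) (out : Bool) : Prop := out = is_primary_subject_py_alt entity_lower text
instance (entity_lower : String) (text : String) (out : Bool) : Decidable (Spec_is_primary_subject_py entity_lower text out) := by unfold Spec_is_primary_subject_py; infer_instance

-- ===== CLAIM (what is proved, stated in full; the proofs are below) =====
def Claim_equal_is_primary_subject_py : Prop := ∀ (entity_lower : String) (text : String), Dom_is_primary_subject_py entity_lower text → Spec_is_primary_subject_py entity_lower text (is_primary_subject_py entity_lower text)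

-- ===== LEMMAS AND PROOFS =====

-- splitting a prefix made of two pieces
theorem pv_append_prefix_iff (a b l : List Char) :
    a ++ b <+: l ↔ a <+: l ∧ b <+: l.drop a.length := by
  constructor
  · rintro ⟨r, hr⟩
    subst hr
    refine ⟨⟨b ++ r, by simp⟩, ?_⟩
    simp
  · rintro ⟨⟨t, ht⟩, hb⟩
    subst ht
    simp only [List.drop_left] at hb
    obtain ⟨r, hr⟩ := hb
    exact ⟨r, by simp [← hr]⟩

-- an infix is a prefix of some tail, with the occurrence inside the list
theorem pv_infix_iff (sub l : List Char) :
    sub <:+: l ↔ ∃ i : Nat, i + sub.length ≤ l.length ∧ sub <+: l.drop i := by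
  constructor
  · rintro ⟨s, t, h⟩
    refine ⟨s.length, ?_, ?_⟩
    · subst h; simp only [List.length_append]; omega
    · subst h; simp
  · rintro ⟨i, _, h⟩
    exact h.isInfix.trans (List.drop_suffix i l).isInfix

-- the core bridge: A's disjunction equals B's occurrence scan
theorem pv_bridge (e cs : List Char) (sufs : List (List Char)) :
    ((e <:+: cs.take 50) ∨ ∃ suf ∈ sufs, (e ++ suf) <:+: cs)
      ↔ ∃ i : Int, (0 ≤ i ∧ i < (cs.length : Int) - e.length + 1) ∧
          e <+: cs.drop i.toNat ∧
          (i.toNat + e.length ≤ 50 ∨ ∃ suf ∈ sufs, suf <+: cs.drop (i.toNat + e.length)) := by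
  constructor
  · rintro (h | ⟨suf, hmem, h⟩)
    · rw [pv_infix_iff] at h
      obtain ⟨i, hlen, hpre⟩ := h
      rw [List.drop_take, List.prefix_take_iff] at hpre
      obtain ⟨hpre, -⟩ := hpre
      simp only [List.length_take] at hlen
      refine ⟨(i : Int), ⟨by omega, by omega⟩, by simpa using hpre, ?_⟩
      left
      simp only [Int.toNat_natCast]
      omega
    · rw [pv_infix_iff] at h
      obtain ⟨i, hlen, hpre⟩ := h
      rw [pv_append_prefix_iff] at hpre
      obtain ⟨hpre, hsuf⟩ := hpre
      simp only [List.length_append] at hlen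
      refine ⟨(i : Int), ⟨by omega, by omega⟩, by simpa using hpre, ?_⟩
      right
      refine ⟨suf, hmem, ?_⟩
      simp only [Int.toNat_natCast]
      simpa [List.drop_drop, Nat.add_comm] using hsuf
  · rintro ⟨i, ⟨hi0, hiub⟩, hpre, hrest⟩
    have hj : (i.toNat : Int) = i := Int.toNat_of_nonneg hi0
    set j := i.toNat with hjdef
    have hjb : j + e.length ≤ cs.length := by omega
    rcases hrest with h50 | ⟨suf, hmem, hsuf⟩
    · left
      rw [pv_infix_iff]
      refine ⟨j, by simp only [List.length_take]; omega, ?_⟩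
      rw [List.drop_take, List.prefix_take_iff]
      exact ⟨hpre, by omega⟩
    · right
      refine ⟨suf, hmem, ?_⟩
      rw [pv_infix_iff]
      have hsl := hsuf.length_le
      simp only [List.length_drop] at hsl
      refine ⟨j, by simp only [List.length_append]; omega, ?_⟩
      rw [pv_append_prefix_iff]
      exact ⟨hpre, by simpa [List.drop_drop, Nat.add_comm] using hsuf⟩

theorem pvPatterns_eq_map (e : List Char) :
    pvPatterns e = pvSuffixes.map (fun s => e ++ s) := rfl

theorem pv_ports_eq (entity_lower text : String) :
    is_primary_subject_py entity_lower text = is_primary_subject_py_alt entity_lower text := by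
  unfold is_primary_subject_py is_primary_subject_py_alt
  dsimp only
  rw [Bool.eq_iff_iff, PySem.List.slice_to text.toList (by norm_num : (0:Int) ≤ 50)]
  have htn : ((50:Int)).toNat = 50 := rfl
  rw [htn]
  have hbridge := pv_bridge entity_lower.toList text.toList pvSuffixes
  split_ifs with hc
  · rw [PySem.Chars.isIn_iff_infix] at hc
    refine iff_of_true rfl ?_
    simp only [List.any_eq_true, PySem.List.mem_pyRange_one, Bool.and_eq_true,
      Bool.or_eq_true, decide_eq_true_eq, PySem.Chars.startswith_iff]
    obtain ⟨i, h1, h2, h3⟩ := hbridge.mp (Or.inl hc)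
    exact ⟨i, h1, h2, h3⟩
  · rw [PySem.Chars.isIn_iff_infix] at hc
    simp only [List.any_eq_true, pvPatterns_eq_map, List.mem_map, PySem.Chars.isIn_iff_infix,
      PySem.List.mem_pyRange_one, Bool.and_eq_true, Bool.or_eq_true, decide_eq_true_eq,
      PySem.Chars.startswith_iff]
    constructor
    · rintro ⟨p, ⟨suf, hmem, rfl⟩, hinf⟩
      obtain ⟨i, h1, h2, h3⟩ := hbridge.mp (Or.inr ⟨suf, hmem, hinf⟩)
      exact ⟨i, h1, h2, h3⟩
    · intro h
      have h' : ∃ i : Int, (0 ≤ i ∧ i < (text.toList.length : Int) - entity_lower.toList.length + 1) ∧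
          entity_lower.toList <+: text.toList.drop i.toNat ∧
          (i.toNat + entity_lower.toList.length ≤ 50 ∨
            ∃ suf ∈ pvSuffixes, suf <+: text.toList.drop (i.toNat + entity_lower.toList.length)) := by
        obtain ⟨i, h1, h2, h3⟩ := h
        exact ⟨i, h1, h2, h3⟩
      rcases hbridge.mpr h' with h50 | ⟨suf, hmem, hinf⟩
      · exact absurd h50 hc
      · exact ⟨entity_lower.toList ++ suf, ⟨suf, hmem, rfl⟩, hinf⟩

-- ===== VERDICT (by name: the statement is the Claim_ definition above) =====
theorem is_primary_subject_py_spec : Claim_equal_is_primary_subject_py := by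
  intro entity_lower text _
  unfold Spec_is_primary_subject_py
  exact pv_ports_eq entity_lower text
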